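-- pv_equiv track=rewrite | github.com/kittilsenstian-debug/the-hand | theory-tools/language_explorer.py | find_decompositions
-- ===== SOURCE A (Python) =====
-- def find_decompositions(target, modes, max_terms=4):
--     """Find all ways to sum modes to reach target, up to max_terms."""
--     results = []
--
--     def search(remaining, current_combo, min_mode):
--         if remaining == 0:
--             results.append(tuple(current_combo))
--             return
--         if len(current_combo) >= max_terms:
--             return
--         for m in modes:
--             if m >= min_mode and m <= remaining:
--                 search(remaining - m, current_combo + [m], m)
--
--     search(target, [], min(modes))
--     return results
-- ===== SOURCE B (Python) =====
-- def find_decompositions(target, modes, max_terms=4):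
--     """Find all ways to sum modes to reach target, up to max_terms.
--
--     Iterative DFS with an explicit stack instead of a recursive closure.
--     Valid children are pushed in reversed order so that popping reproduces
--     the recursive preorder exactly."""
--     min0 = min(modes)
--     results = []
--     stack = [(target, [], min0)]
--     while stack:
--         remaining, combo, min_mode = stack.pop()
--         if remaining == 0:
--             results.append(tuple(combo))
--             continue
--         if len(combo) >= max_terms:
--             continue
--         children = [(remaining - m, combo + [m], m)
--                     for m in modes if min_mode <= m <= remaining]
--         stack.extend(reversed(children))
--     return results
-- ===== Notes on version B (the rewrite author's own statement) =====
-- stated objective: alternative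
-- what changed: Replaced the recursive closure mutating a shared results list by an iterative DFS over an explicit stack of (remaining, combo, min_mode) frames, pushing valid children in reversed order so popping reproduces the recursive preorder.
import Mathlib
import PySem

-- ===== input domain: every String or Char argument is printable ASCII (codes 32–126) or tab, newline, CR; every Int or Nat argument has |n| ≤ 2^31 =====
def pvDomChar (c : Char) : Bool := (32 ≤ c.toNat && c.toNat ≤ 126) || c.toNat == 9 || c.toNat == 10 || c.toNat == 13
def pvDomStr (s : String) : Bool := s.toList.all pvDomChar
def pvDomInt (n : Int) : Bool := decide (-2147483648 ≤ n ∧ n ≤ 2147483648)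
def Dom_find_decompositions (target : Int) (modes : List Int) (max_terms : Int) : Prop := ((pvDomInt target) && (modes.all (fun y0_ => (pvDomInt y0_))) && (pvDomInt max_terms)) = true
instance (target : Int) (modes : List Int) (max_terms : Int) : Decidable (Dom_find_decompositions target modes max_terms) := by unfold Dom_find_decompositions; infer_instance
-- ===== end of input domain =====

-- B replaces A's recursive closure (which mutates a shared results list) by an
-- iterative DFS over an explicit stack of (remaining, combo, min_mode) frames,
-- pushing valid children in reversed order so popping reproduces the recursive
-- preorder. Objective: alternative; same output, same order.

-- ===== PORT A =====
-- inner 'search': fuel = max_terms - len(current_combo); fuel = 0 iff len(current_combo) >= max_terms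
def pvSearchA (modes : List Int) (fuel : Nat) (remaining : Int) (combo : List Int)
    (min_mode : Int) (results : List (List Int)) : List (List Int) :=
  if remaining = 0 then results ++ [combo]
  else
    match fuel with
    | 0 => results
    | Nat.succ fuel' =>
      modes.foldl (fun acc m =>
        if min_mode ≤ m ∧ m ≤ remaining then
          pvSearchA modes fuel' (remaining - m) (combo ++ [m]) m acc
        else acc) results
termination_by fuel

def find_decompositions (target : Int) (modes : List Int) (max_terms : Int) : List (List Int) :=
  match PySem.List.min? modes (fun x => x) with
  | none => []   -- min([]) raises ValueError in Python; excluded by Pre_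
  | some lo => pvSearchA modes max_terms.toNat target [] lo []

-- ===== PORT B =====
-- termination measure for the stack loop: each frame weighs (|modes|+1)^(max_terms - len combo)
def pvWeight (k M : Nat) (f : Int × List Int × Int) : Nat := (k + 1) ^ (M - f.2.1.length)
def pvMeas (k M : Nat) (st : List (Int × List Int × Int)) : Nat := (st.map (pvWeight k M)).sum

lemma pvMeas_drop (k M : Nat) (f : Int × List Int × Int) (rest : List (Int × List Int × Int)) :
    pvMeas k M rest < pvMeas k M (f :: rest) := by
  have h : 0 < pvWeight k M f := Nat.pow_pos (Nat.succ_pos k)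
  simp only [pvMeas, List.map_cons, List.sum_cons]
  omega

lemma pvMeas_sum_children (k M L : Nat) (children : List (Int × List Int × Int))
    (hch : ∀ f ∈ children, f.2.1.length = L) :
    (children.map (pvWeight k M)).sum = children.length * (k + 1) ^ (M - L) := by
  induction children with
  | nil => simp
  | cons c t ih =>
    have hc := hch c (by simp)
    have ht : ∀ f ∈ t, f.2.1.length = L := fun f hf => hch f (by simp [hf])
    simp only [List.map_cons, List.sum_cons, List.length_cons, pvWeight, hc, ih ht]
    ring

lemma pvMeas_expand (k M : Nat) (remaining min_mode : Int) (combo : List Int)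
    (children : List (Int × List Int × Int)) (rest : List (Int × List Int × Int))
    (hlen : combo.length < M) (hcnt : children.length ≤ k)
    (hch : ∀ f ∈ children, f.2.1.length = combo.length + 1) :
    pvMeas k M (children ++ rest) < pvMeas k M ((remaining, combo, min_mode) :: rest) := by
  have hsum := pvMeas_sum_children k M (combo.length + 1) children hch
  have hw : 0 < (k + 1) ^ (M - (combo.length + 1)) := Nat.pow_pos (Nat.succ_pos k)
  have hlt : children.length * (k + 1) ^ (M - (combo.length + 1)) < (k + 1) ^ (M - combo.length) := by
    have hM : M - combo.length = (M - (combo.length + 1)) + 1 := by omega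
    rw [hM, pow_succ]
    calc children.length * (k + 1) ^ (M - (combo.length + 1))
        ≤ k * (k + 1) ^ (M - (combo.length + 1)) := Nat.mul_le_mul_right _ hcnt
      _ < (k + 1) * (k + 1) ^ (M - (combo.length + 1)) := (Nat.mul_lt_mul_right hw).mpr (Nat.lt_succ_self k)
      _ = (k + 1) ^ (M - (combo.length + 1)) * (k + 1) := Nat.mul_comm _ _
  have heq2 : pvMeas k M (children ++ rest)
      = children.length * (k + 1) ^ (M - (combo.length + 1)) + pvMeas k M rest := by
    simp [pvMeas, hsum]
  have heq3 : pvMeas k M ((remaining, combo, min_mode) :: rest)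
      = (k + 1) ^ (M - combo.length) + pvMeas k M rest := by
    simp [pvMeas, pvWeight]
  omega

-- the children pushed for one frame: Source B's list comprehension over modes
def pvChildren (modes : List Int) (remaining : Int) (combo : List Int) (min_mode : Int) :
    List (Int × List Int × Int) :=
  (modes.filter (fun m => decide (min_mode ≤ m ∧ m ≤ remaining))).map
    (fun m => (remaining - m, combo ++ [m], m))

-- the while loop of Source B; the Python stack's top (list end) is the head here,
-- so 'stack.extend(reversed(children))' followed by pops in order = 'children ++ rest'
def pvLoopB (modes : List Int) (max_terms : Int) :
    List (Int × List Int × Int) → List (List Int) → List (List Int)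
  | [], results => results
  | (remaining, combo, min_mode) :: rest, results =>
    if remaining = 0 then pvLoopB modes max_terms rest (results ++ [combo])
    else if max_terms ≤ (combo.length : Int) then pvLoopB modes max_terms rest results
    else
      pvLoopB modes max_terms (pvChildren modes remaining combo min_mode ++ rest) results
  termination_by st _ => pvMeas modes.length max_terms.toNat st
  decreasing_by
  · exact pvMeas_drop _ _ _ _
  · exact pvMeas_drop _ _ _ _
  · apply pvMeas_expand
    · omega
    · simp only [pvChildren, List.length_map]
      exact List.length_filter_le _ _
    · intro f hf
      simp only [pvChildren, List.mem_map, List.mem_filter] at hf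
      obtain ⟨m, _, hm⟩ := hf
      simp [← hm]

def find_decompositions_alt (target : Int) (modes : List Int) (max_terms : Int) : List (List Int) :=
  match PySem.List.min? modes (fun x => x) with
  | none => []   -- min([]) raises ValueError in Python; excluded by Pre_
  | some lo => pvLoopB modes max_terms [(target, [], lo)] []

-- ===== PRECONDITION & SPEC =====
-- Pre_ excludes only modes = [], where Python's min([]) raises ValueError (in A and in B alike).
def Pre_find_decompositions (_target : Int) (modes : List Int) (_max_terms : Int) : Prop := modes ≠ []
instance (target : Int) (modes : List Int) (max_terms : Int) : Decidable (Pre_find_decompositions target modes max_terms) := by unfold Pre_find_decompositions; infer_instance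
def pvWitness_find_decompositions : Int × List Int × Int := (6, [1, 2, 3], 4)
def Spec_find_decompositions (target : Int) (modes : List Int) (max_terms : Int) (out : List (List Int)) : Prop := out = find_decompositions_alt target modes max_terms
instance (target : Int) (modes : List Int) (max_terms : Int) (out : List (List Int)) : Decidable (Spec_find_decompositions target modes max_terms out) := by unfold Spec_find_decompositions; infer_instance

-- ===== CLAIM (what is proved, stated in full; the proofs are below) =====
def Claim_equal_find_decompositions : Prop := ∀ (target : Int) (modes : List Int) (max_terms : Int), Dom_find_decompositions target modes max_terms → Pre_find_decompositions target modes max_terms → Spec_find_decompositions target modes max_terms (find_decompositions target modes max_terms)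

-- ===== LEMMAS AND PROOFS =====

-- proof-only reference function: the decompositions of 'remaining' with 'fuel' terms left
def pvGo (modes : List Int) (fuel : Nat) (remaining : Int) (min_mode : Int) : List (List Int) :=
  if remaining = 0 then [[]]
  else
    match fuel with
    | 0 => []
    | Nat.succ fuel' =>
      (modes.filter (fun m => decide (min_mode ≤ m ∧ m ≤ remaining))).flatMap
        (fun m => (pvGo modes fuel' (remaining - m) m).map (fun tail => m :: tail))
termination_by fuel

lemma pv_flatMap_if {α β : Type} (l : List α) (p : α → Bool) (g : α → List β) :
    l.flatMap (fun x => if p x then g x else []) = (l.filter p).flatMap g := by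
  induction l with
  | nil => rfl
  | cons x t ih =>
    by_cases h : p x <;> simp [List.flatMap_cons, h, ih]

lemma pvSearchA_eq_go (modes : List Int) (fuel : Nat) :
    ∀ (remaining : Int) (combo : List Int) (min_mode : Int) (results : List (List Int)),
      pvSearchA modes fuel remaining combo min_mode results
        = results ++ (pvGo modes fuel remaining min_mode).map (fun t => combo ++ t) := by
  induction fuel with
  | zero =>
    intro remaining combo min_mode results
    by_cases h : remaining = 0 <;> simp [pvSearchA, pvGo, h]
  | succ fuel' ih =>
    intro remaining combo min_mode results
    by_cases h : remaining = 0
    · simp [pvSearchA, pvGo, h]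
    · rw [pvSearchA, pvGo, if_neg h, if_neg h]
      simp only [ih]
      have step : ∀ (acc : List (List Int)) (m : Int),
          (if min_mode ≤ m ∧ m ≤ remaining then
             acc ++ (pvGo modes fuel' (remaining - m) m).map (fun t => (combo ++ [m]) ++ t)
           else acc)
          = acc ++ (if decide (min_mode ≤ m ∧ m ≤ remaining) then
                      (pvGo modes fuel' (remaining - m) m).map (fun t => (combo ++ [m]) ++ t)
                    else []) := by
        intro acc m; by_cases hm : min_mode ≤ m ∧ m ≤ remaining <;> simp [hm]
      simp only [step]
      rw [PySem.List.foldl_append_eq_flatMap, pv_flatMap_if]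
      simp only [List.map_flatMap, Function.comp_def, List.map_map]
      congr 1
      congr 1
      funext m
      congr 1
      funext t
      simp

-- the value the loop owes for one frame
def pvFrameVal (modes : List Int) (max_terms : Int) (f : Int × List Int × Int) : List (List Int) :=
  (pvGo modes (max_terms.toNat - f.2.1.length) f.1 f.2.2).map (fun t => f.2.1 ++ t)

lemma pvLoopB_eq_go (modes : List Int) (max_terms : Int) :
    ∀ (st : List (Int × List Int × Int)) (results : List (List Int)),
      pvLoopB modes max_terms st results
        = results ++ st.flatMap (pvFrameVal modes max_terms) := by
  intro st results
  induction st, results using pvLoopB.induct modes max_terms with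
  | case1 results => simp [pvLoopB]
  | case2 combo min_mode rest results ih =>
    rw [pvLoopB, if_pos rfl]
    rw [ih]
    have h0 : pvGo modes (max_terms.toNat - combo.length) 0 min_mode = [[]] := by
      rw [pvGo.eq_def]; simp
    simp [pvFrameVal, h0]
  | case3 remaining combo min_mode rest results h hmax ih =>
    rw [pvLoopB, if_neg h, if_pos hmax]
    rw [ih]
    have hfuel : max_terms.toNat - combo.length = 0 := by omega
    simp [pvFrameVal, hfuel, pvGo, h]
  | case4 remaining combo min_mode rest results h hmax ih =>
    rw [pvLoopB, if_neg h, if_neg hmax]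
    rw [ih]
    have hlen : (combo.length : Int) < max_terms := by omega
    have hfuel : max_terms.toNat - combo.length
        = Nat.succ (max_terms.toNat - (combo.length + 1)) := by omega
    congr 1
    rw [List.flatMap_append]
    congr 1
    simp only [pvChildren, pvFrameVal, List.flatMap_map]
    rw [hfuel, pvGo, if_neg h]
    simp only [List.map_flatMap, Function.comp_def, List.map_map]
    congr 1
    funext m
    have hlc : (combo ++ [m]).length = combo.length + 1 := by simp
    rw [hlc]
    congr 1
    funext t
    simp

-- ===== VERDICT (by name: the statement is the Claim_ definition above) =====
theorem find_decompositions_spec : Claim_equal_find_decompositions := by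
  intro target modes max_terms _ _
  unfold Spec_find_decompositions find_decompositions find_decompositions_alt
  cases PySem.List.min? modes (fun x => x) with
  | none => rfl
  | some lo =>
    show pvSearchA modes max_terms.toNat target [] lo []
        = pvLoopB modes max_terms [(target, [], lo)] []
    rw [pvSearchA_eq_go, pvLoopB_eq_go]
    simp [pvFrameVal]
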